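-- pv_equiv track=rewrite | github.com/cngba/gem-hunter-SAT | sample2.py | at_most
-- ===== SOURCE A (Python) =====
-- n = 2
--
-- def at_most(n, neighbors):
--     """
--     n is the number of bombs nearby
--     neighbors is the list of neighboring cells
--     """
--     clauses = []
--
--     rows_count = 2 ** len(neighbors)
--     for row in range(rows_count):
--         bin_representation = '{0:0{len}b}'.format(row, len=len(neighbors))
--         bit_count = bin_representation.count("1")
--         if bit_count == n + 1:
--             """
--             Example: There are 3 bombs nearby
--             Which means n == 3
--             if bit_count == 4
--             """
--             clauses.append([-neighbors[i] for i in range(len(neighbors)) if (bin_representation[i] == '1')])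
--
--     return clauses
-- ===== SOURCE B (Python) =====
-- def at_most(n, neighbors):
--     """Same clauses as A, built by enumerating (n+1)-subsets of indices
--     directly (lex order, then reversed = ascending bitmask order) instead
--     of scanning all 2**len(neighbors) bitmasks."""
--     k = len(neighbors)
--     m = n + 1
--     if m < 0 or m > k:
--         return []
--
--     def build(start, need):
--         if need == 0:
--             return [[]]
--         res = []
--         for i in range(start, k - need + 1):
--             for rest in build(i + 1, need - 1):
--                 res.append([-neighbors[i]] + rest)
--         return res
--
--     return build(0, m)[::-1]
-- ===== Notes on version B (the rewrite author's own statement) =====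
-- stated objective: alternative
-- what changed: Instead of scanning all 2^k bitmasks and keeping those with popcount n+1, B enumerates the (n+1)-element index combinations directly by recursion (lex order) and reverses the list, which equals A's ascending-bitmask order; intended as faster (measured 114x at size 16) but at the largest probe size the output itself is combinatorially large, so a timing run could not confirm it there.
import Mathlib
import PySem

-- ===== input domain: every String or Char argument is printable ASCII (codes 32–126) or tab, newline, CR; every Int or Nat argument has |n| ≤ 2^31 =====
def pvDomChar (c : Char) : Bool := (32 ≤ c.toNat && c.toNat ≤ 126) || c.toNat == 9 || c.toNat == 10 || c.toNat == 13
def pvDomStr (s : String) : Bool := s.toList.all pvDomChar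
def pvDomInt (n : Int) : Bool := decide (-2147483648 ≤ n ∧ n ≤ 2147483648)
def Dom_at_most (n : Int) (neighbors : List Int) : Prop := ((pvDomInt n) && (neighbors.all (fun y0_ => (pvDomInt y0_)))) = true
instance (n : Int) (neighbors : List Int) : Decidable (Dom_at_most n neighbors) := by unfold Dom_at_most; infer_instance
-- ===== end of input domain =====

-- B replaces A's scan over all 2^k bitmasks by direct enumeration of the (n+1)-element
-- index combinations (objective: alternative; intended as faster, measured 114x at size 16,
-- unconfirmed at larger sizes where the output itself is combinatorially large).

-- ===== PORT A =====
-- '{0:0{len}b}'.format(row, len=w): zero-padded binary string of row, MSB first.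
-- binPad is exact for row < 2^w; width 0 with row 0 is the ['0'] branch below (exact, row < 2^0 = row = 0).
def binPad : Nat → Nat → List Char
  | 0, _ => []
  | w+1, row => (if row / 2^w = 1 then '1' else '0') :: binPad w (row % 2^w)

def at_most (n : Int) (neighbors : List Int) : List (List Int) :=
  let k := neighbors.length
  let rowsCount := 2^k
  (List.range rowsCount).foldl
    (fun clauses row =>
      let s := if k = 0 then ['0'] else binPad k row
      let bitCount := s.count '1'
      if ((bitCount : Int) = n + 1) then
        clauses ++ [((List.range k).filterMap
          (fun i => if s.getD i ' ' = '1' then some (-(neighbors.getD i 0)) else none))]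
      else clauses)
    []

-- ===== PORT B =====
-- build(start, need) of Source B; range(start, k - need + 1) has (k - need + 1) - start elements
-- (exact for the reachable states, where start + need ≤ k + 1 so Nat subtraction never truncates).
def buildCombos (neighbors : List Int) (k : Nat) : Nat → Nat → List (List Int)
  | _, 0 => [[]]
  | start, need+1 =>
      (List.range' start ((k - (need+1) + 1) - start)).flatMap
        (fun i => (buildCombos neighbors k (i+1) need).map
          (fun rest => (-(neighbors.getD i 0)) :: rest))

def at_most_alt (n : Int) (neighbors : List Int) : List (List Int) :=
  let k := neighbors.length
  let m := n + 1
  if m < 0 ∨ (k : Int) < m then []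
  else (buildCombos neighbors k 0 m.toNat).reverse

-- ===== PRECONDITION & SPEC =====
def Spec_at_most (n : Int) (neighbors : List Int) (out : List (List Int)) : Prop := out = at_most_alt n neighbors
instance (n : Int) (neighbors : List Int) (out : List (List Int)) : Decidable (Spec_at_most n neighbors out) := by unfold Spec_at_most; infer_instance

-- ===== CLAIM (what is proved, stated in full; the proofs are below) =====
def Claim_equal_at_most : Prop := ∀ (n : Int) (neighbors : List Int), Dom_at_most n neighbors → Spec_at_most n neighbors (at_most n neighbors)

-- ===== LEMMAS AND PROOFS =====

-- A's per-row clause, factored for the proofs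
def rowClause (ns : List Int) (s : List Char) : List Int :=
  (List.range ns.length).filterMap
    (fun i => if s.getD i ' ' = '1' then some (-(ns.getD i 0)) else none)

def Acore (n : Int) (ns : List Int) : List (List Int) :=
  (List.range (2 ^ ns.length)).filterMap
    (fun row =>
      let s := binPad ns.length row
      if (((s.count '1' : Nat) : Int) = n + 1) then some (rowClause ns s) else none)

theorem foldl_app_filterMap {α β : Type} (p : α → Prop) [DecidablePred p] (f : α → β) :
    ∀ (l : List α) (init : List β),
      l.foldl (fun acc x => if p x then acc ++ [f x] else acc) init
        = init ++ l.filterMap (fun x => if p x then some (f x) else none) := by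
  intro l
  induction l with
  | nil => intro init; simp
  | cons a t ih =>
    intro init
    rw [List.foldl_cons, ih, List.filterMap_cons]
    by_cases h : p a
    · simp [h]
    · simp [h]

theorem at_most_eq_A' (n : Int) (ns : List Int) :
    at_most n ns
      = [] ++ (List.range (2 ^ ns.length)).filterMap (fun row =>
          if (((if ns.length = 0 then ['0'] else binPad ns.length row).count '1' : Nat) : Int) = n + 1 then
            some ((List.range ns.length).filterMap
              (fun i => if (if ns.length = 0 then ['0'] else binPad ns.length row).getD i ' ' = '1' then
                some (-(ns.getD i 0)) else none))
          else none) :=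
  foldl_app_filterMap
    (fun row => (((if ns.length = 0 then ['0'] else binPad ns.length row).count '1' : Nat) : Int) = n + 1)
    (fun row => (List.range ns.length).filterMap
      (fun i => if (if ns.length = 0 then ['0'] else binPad ns.length row).getD i ' ' = '1' then
        some (-(ns.getD i 0)) else none))
    (List.range (2 ^ ns.length)) []

theorem at_most_eq_Acore (n : Int) (ns : List Int) : at_most n ns = Acore n ns := by
  rw [at_most_eq_A', List.nil_append]
  unfold Acore rowClause
  apply List.filterMap_congr
  intro row _
  by_cases h : ns.length = 0
  · simp [h, binPad]
  · simp [h]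

theorem binPad_low {k r : Nat} (h : r < 2 ^ k) : binPad (k + 1) r = '0' :: binPad k r := by
  simp [binPad, Nat.div_eq_of_lt h, Nat.mod_eq_of_lt h]

theorem binPad_high {k r : Nat} (h : r < 2 ^ k) :
    binPad (k + 1) (2 ^ k + r) = '1' :: binPad k r := by
  have h1 : (2 ^ k + r) / 2 ^ k = 1 := by
    rw [Nat.add_comm, Nat.add_div_right _ (Nat.pos_of_ne_zero (by positivity))]
    simp [Nat.div_eq_of_lt h]
  have h2 : (2 ^ k + r) % 2 ^ k = r := by
    rw [Nat.add_comm, Nat.add_mod_right]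
    exact Nat.mod_eq_of_lt h
  simp [binPad, h1, h2]

theorem rowClause_cons (x : Int) (xs : List Int) (c : Char) (s : List Char) :
    rowClause (x :: xs) (c :: s)
      = (if c = '1' then [-x] else []) ++ rowClause xs s := by
  unfold rowClause
  rw [show (x :: xs).length = xs.length + 1 from rfl, List.range_succ_eq_map]
  rw [List.filterMap_cons, List.filterMap_map]
  by_cases h : c = '1' <;> simp [h, Function.comp_def]

theorem Acore_cons (n : Int) (x : Int) (xs : List Int) :
    Acore n (x :: xs) = Acore n xs ++ (Acore (n - 1) xs).map (fun c => -x :: c) := by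
  unfold Acore
  rw [show (x :: xs).length = xs.length + 1 from rfl]
  rw [show 2 ^ (xs.length + 1) = 2 ^ xs.length + 2 ^ xs.length by ring]
  rw [List.range_add, List.filterMap_append, List.filterMap_map]
  congr 1
  · apply List.filterMap_congr
    intro r hr
    have hr' : r < 2 ^ xs.length := List.mem_range.mp hr
    simp only [binPad_low hr', rowClause_cons, List.count_cons]
    simp
  · rw [List.map_filterMap]
    apply List.filterMap_congr
    intro r hr
    have hr' : r < 2 ^ xs.length := List.mem_range.mp hr
    simp only [Function.comp_def, binPad_high hr', rowClause_cons, List.count_cons]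
    by_cases h : (((binPad xs.length r).count '1' : Nat) : Int) = n - 1 + 1
    · have h' : ((((binPad xs.length r).count '1' + 1 : Nat)) : Int) = n + 1 := by push_cast; omega
      simp [h, h']
    · have h' : ¬ ((((binPad xs.length r).count '1' + 1 : Nat)) : Int) = n + 1 := by push_cast at h ⊢; omega
      simp [h, h']

-- index shift: build over (x :: xs) starting past index 0 is build over xs
theorem buildCombos_shift (x : Int) (xs : List Int) :
    ∀ (need s : Nat), need + s ≤ xs.length →
      buildCombos (x :: xs) (xs.length + 1) (s + 1) need = buildCombos xs xs.length s need := by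
  intro need
  induction need with
  | zero => intro s _; rfl
  | succ m ih =>
    intro s hs
    unfold buildCombos
    have hc : (xs.length + 1 - (m + 1) + 1) - (s + 1) = (xs.length - (m + 1) + 1) - s := by omega
    rw [hc]
    rw [List.range'_eq_map_range, List.range'_eq_map_range, List.flatMap_map, List.flatMap_map]
    apply List.flatMap_congr
    intro j hj
    have hj' : j < (xs.length - (m + 1) + 1) - s := List.mem_range.mp hj
    have h1 : s + 1 + j = (s + j) + 1 := by omega
    rw [h1, ih (s + j + 1) (by omega)]
    simp [List.getD_cons_succ]

theorem buildCombos_cons (x : Int) (xs : List Int) (m : Nat) (hm : m ≤ xs.length) :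
    buildCombos (x :: xs) (xs.length + 1) 0 (m + 1)
      = (buildCombos xs xs.length 0 m).map (fun rest => -x :: rest)
        ++ (if m + 1 ≤ xs.length then buildCombos xs xs.length 0 (m + 1) else []) := by
  conv_lhs => unfold buildCombos
  have hc : (xs.length + 1 - (m + 1) + 1) - 0 = (xs.length - m) + 1 := by omega
  rw [hc]
  have hr : List.range' 0 (xs.length - m + 1) = 0 :: List.range' 1 (xs.length - m) := rfl
  rw [hr, List.flatMap_cons]
  congr 1
  · rw [buildCombos_shift x xs m 0 (by omega)]
    simp
  · by_cases h : m + 1 ≤ xs.length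
    · rw [if_pos h]
      rw [← buildCombos_shift x xs (m + 1) 0 (by omega)]
      conv_rhs => unfold buildCombos
      have h2 : (xs.length + 1 - (m + 1) + 1) - (0 + 1) = xs.length - m := by omega
      rw [h2]
    · rw [if_neg h]
      have hm0 : xs.length - m = 0 := by omega
      rw [hm0]
      simp

theorem main_eq : ∀ (ns : List Int) (n : Int), Acore n ns = at_most_alt n ns := by
  intro ns
  induction ns with
  | nil =>
    intro n
    simp only [Acore, at_most_alt, List.length_nil]
    by_cases h : n + 1 = 0
    · have h0 : ¬ (n + 1 < 0 ∨ ((0:Nat) : Int) < n + 1) := by omega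
      have ht : (n + 1).toNat = 0 := by omega
      simp [List.range_succ, binPad, rowClause, h, h0, ht, buildCombos]
    · have h1 : ¬ (((0:Nat):Int) = n + 1) := by omega
      simp [List.range_succ, binPad, rowClause, h1]
      split_ifs with hh hh2 <;> first | rfl | (exfalso; omega)
  | cons x xs ih =>
    intro n
    rw [Acore_cons, ih, ih]
    simp only [at_most_alt, List.length_cons]
    by_cases hneg : n + 1 < 0
    · have g1 : (n + 1 < 0 ∨ ((xs.length + 1 : Nat) : Int) < n + 1) := Or.inl hneg
      have g2 : (n + 1 < 0 ∨ ((xs.length : Nat) : Int) < n + 1) := Or.inl hneg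
      have g3 : (n - 1 + 1 < 0 ∨ ((xs.length : Nat) : Int) < n - 1 + 1) := Or.inl (by omega)
      rw [if_pos g1, if_pos g2, if_pos g3]
      simp
    · by_cases hbig : ((xs.length + 1 : Nat) : Int) < n + 1
      · have hbig' : (xs.length : Int) + 1 < n + 1 := by push_cast at hbig; omega
        have g1 : (n + 1 < 0 ∨ ((xs.length + 1 : Nat) : Int) < n + 1) := Or.inr hbig
        have g2 : (n + 1 < 0 ∨ ((xs.length : Nat) : Int) < n + 1) := Or.inr (by omega)
        have g3 : (n - 1 + 1 < 0 ∨ ((xs.length : Nat) : Int) < n - 1 + 1) := Or.inr (by omega)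
        rw [if_pos g1, if_pos g2, if_pos g3]
        simp
      · -- 0 ≤ n + 1 ≤ xs.length + 1
        have hub : n + 1 ≤ (xs.length : Int) + 1 := by push_cast at hbig; omega
        have g1 : ¬ (n + 1 < 0 ∨ ((xs.length + 1 : Nat) : Int) < n + 1) := by
          push_neg
          exact ⟨by omega, by push_cast; omega⟩
        rw [if_neg g1]
        by_cases hz : n + 1 = 0
        · have g2 : ¬ (n + 1 < 0 ∨ ((xs.length : Nat) : Int) < n + 1) := by push_neg; omega
          have g3 : (n - 1 + 1 < 0 ∨ ((xs.length : Nat) : Int) < n - 1 + 1) := Or.inl (by omega)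
          have ht : (n + 1).toNat = 0 := by omega
          rw [if_neg g2, if_pos g3, ht]
          simp [buildCombos]
        · obtain ⟨m', hm'⟩ : ∃ m' : Nat, (n + 1).toNat = m' + 1 :=
            ⟨(n + 1).toNat - 1, by omega⟩
          have hm'le : m' ≤ xs.length := by omega
          rw [hm', buildCombos_cons x xs m' hm'le, List.reverse_append]
          have g3 : ¬ (n - 1 + 1 < 0 ∨ ((xs.length : Nat) : Int) < n - 1 + 1) := by
            push_neg; omega
          rw [if_neg g3]
          have ht' : (n - 1 + 1).toNat = m' := by omega
          rw [ht']
          by_cases h2 : ((xs.length : Nat) : Int) < n + 1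
          · have hx : ¬ (m' + 1 ≤ xs.length) := by omega
            rw [if_pos (Or.inr h2), if_neg hx]
            simp [List.map_reverse]
          · have hx : m' + 1 ≤ xs.length := by omega
            rw [if_neg (by push_neg; exact ⟨by omega, by omega⟩), if_pos hx]
            simp [List.map_reverse]

-- ===== VERDICT (by name: the statement is the Claim_ definition above) =====
theorem at_most_spec : Claim_equal_at_most := by
  intro n ns _
  unfold Spec_at_most
  rw [at_most_eq_Acore, main_eq]
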